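-- pv_equiv track=rewrite | github.com/thisIsJooS/Problem-Solving-Hub | book--co-te-hap-doe/8-24.py | solution
-- ===== SOURCE A (Python) =====
-- def solution(id_list, report, k):
--     answer = []
--
--     reported_count = {}
--     report_history = {}
--     for r in report:
--         reporter, reportee = r.split()
--         if reportee not in reported_count:
--             reported_count[reportee] = 1
--         else:
--             if reporter in report_history and reportee in report_history[reporter]:
--                 pass
--             else:
--                 reported_count[reportee] += 1
--
--         if reporter not in report_history:
--             report_history[reporter] = {reportee}
--         else:
--             report_history[reporter].add(reportee)
--
--     reported_result = {}
--     for reportee in reported_count: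
--         if reported_count[reportee] >= k:
--             reported_result[reportee] = True
--
--     for i, userId in enumerate(id_list):
--         if userId not in report_history:
--             answer.append(0)
--             continue
--
--         cnt = 0
--         for reportee in report_history[userId]:
--             if reportee in reported_result:
--                 cnt += 1
--
--         answer.append(cnt)
--
--     return answer
-- ===== SOURCE B (Python) =====
-- def solution(id_list, report, k):
--     pairs = {tuple(r.split()) for r in report}
--     banned = {e for (_, e) in pairs if sum(1 for (_, b) in pairs if b == e) >= k}
--     return [sum(1 for (a, b) in pairs if a == u and b in banned) for u in id_list]
-- ===== Notes on version B (the rewrite author's own statement) =====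
-- stated objective: alternative
-- what changed: B builds no counting or history dictionaries at all: it deduplicates the reports into a set of pairs and computes every count by direct scans over that set (a scan per reportee for the banned set, a scan per queried user for the answer), replacing A's incremental hash-map aggregation with brute-force counting.
import Mathlib
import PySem

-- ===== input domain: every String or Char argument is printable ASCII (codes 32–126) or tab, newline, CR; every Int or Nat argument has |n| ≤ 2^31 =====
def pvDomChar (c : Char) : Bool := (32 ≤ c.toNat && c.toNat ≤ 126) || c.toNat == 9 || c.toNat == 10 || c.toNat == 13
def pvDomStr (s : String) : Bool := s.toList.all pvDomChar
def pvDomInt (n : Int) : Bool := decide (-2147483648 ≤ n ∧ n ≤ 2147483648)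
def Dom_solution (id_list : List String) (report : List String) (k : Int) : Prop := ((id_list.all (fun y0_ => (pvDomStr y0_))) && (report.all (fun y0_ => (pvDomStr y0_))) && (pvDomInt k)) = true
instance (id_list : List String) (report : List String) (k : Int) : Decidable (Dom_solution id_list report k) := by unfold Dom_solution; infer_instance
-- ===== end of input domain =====

-- B builds no counting/history dictionaries: it deduplicates the pairs and computes every count by
-- direct scans over the deduplicated pair set (objective: alternative — brute-force counting, not faster).


-- state of A's first loop: (reported_count, report_history)
abbrev PVState := PySem.Dict String Int × PySem.Dict String (PySem.Set String)

-- 'reporter, reportee = r.split()' — the unpacking both Pythons perform; a string not splitting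
-- into exactly two words raises ValueError in Python (those inputs are outside Pre_solution)
def parse2 (r : String) : Option (String × String) :=
  match PySem.Str.split₀ r with
  | [a, b] => some (a, b)
  | _ => none

-- ===== PORT A =====
-- one iteration of A's loop body on the unpacked pair (reporter, reportee)
def stepA (st : PVState) (p : String × String) : PVState :=
  let reporter := p.1
  let reportee := p.2
  let rc :=
    if st.1.contains reportee = false then st.1.insert reportee 1
    else if (match st.2.get? reporter with
             | some s => PySem.Set.contains s reportee
             | none => false) then st.1
    else st.1.modify reportee 0 (· + 1)
  let rh :=
    if st.2.contains reporter = false then st.2.insert reporter (PySem.Set.ofList [reportee])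
    else st.2.insert reporter (PySem.Set.add (st.2.getD reporter PySem.Set.empty) reportee)
  (rc, rh)

def solution (id_list : List String) (report : List String) (k : Int) : List Int :=
  let st := report.foldl (fun st r =>
      match parse2 r with
      | some p => stepA st p
      | none => st) ((PySem.Dict.empty, PySem.Dict.empty) : PVState)
  let reported_count := st.1
  let report_history := st.2
  let reported_result := reported_count.keys.foldl (fun (d : PySem.Dict String Bool) reportee =>
      if k ≤ reported_count.getD reportee 0 then d.insert reportee true else d) PySem.Dict.empty
  id_list.foldl (fun answer userId =>
      match report_history.get? userId with
      | none => answer ++ [(0 : Int)]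
      | some s => answer ++ [s.foldl (fun cnt reportee =>
          if reported_result.contains reportee then cnt + 1 else cnt) (0 : Int)]) []

-- ===== PORT B =====
def solution_alt (id_list : List String) (report : List String) (k : Int) : List Int :=
  -- pairs = {tuple(r.split()) for r in report}
  let pairs : PySem.Set (String × String) := PySem.Set.ofList (report.filterMap parse2)
  -- banned = {e for (_, e) in pairs if sum(1 for (_, b) in pairs if b == e) >= k}
  let banned : PySem.Set String :=
    PySem.Set.ofList ((pairs.filter
      (fun p => decide (k ≤ ((pairs.countP (fun q => q.2 == p.2) : Nat) : Int)))).map (·.2))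
  -- [sum(1 for (a, b) in pairs if a == u and b in banned) for u in id_list]
  id_list.map (fun u =>
    ((pairs.countP (fun p => p.1 == u && PySem.Set.contains banned p.2) : Nat) : Int))

-- ===== PRECONDITION & SPEC =====
-- Pre_ excludes reports that do not split into exactly two whitespace-separated words:
-- there Python A raises ValueError at 'reporter, reportee = r.split()'.
def Pre_solution (id_list : List String) (report : List String) (k : Int) : Prop :=
  report.all (fun r => (PySem.Str.split₀ r).length == 2) = true
instance (id_list : List String) (report : List String) (k : Int) : Decidable (Pre_solution id_list report k) := by unfold Pre_solution; infer_instance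

def pvWitness_solution : List String × List String × Int :=
  (["muzi", "frodo", "apeach", "neo"],
   ["muzi frodo", "apeach frodo", "frodo neo", "muzi neo", "apeach muzi"], 2)

def Spec_solution (id_list : List String) (report : List String) (k : Int) (out : List Int) : Prop := out = solution_alt id_list report k
instance (id_list : List String) (report : List String) (k : Int) (out : List Int) : Decidable (Spec_solution id_list report k out) := by unfold Spec_solution; infer_instance

-- ===== CLAIM (what is proved, stated in full; the proofs are below) =====
def Claim_equal_solution : Prop := ∀ (id_list : List String) (report : List String) (k : Int), Dom_solution id_list report k → Pre_solution id_list report k → Spec_solution id_list report k (solution id_list report k)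

-- ===== LEMMAS AND PROOFS =====

-- proof-only names for the two components of A's first-loop state over the deduplicated pairs
def stepC (d : PySem.Dict String Int) (p : String × String) : PySem.Dict String Int :=
  d.insert p.2 (d.getD p.2 0 + 1)

def stepH (d : PySem.Dict String (PySem.Set String)) (p : String × String) :
    PySem.Dict String (PySem.Set String) :=
  d.insert p.1 (PySem.Set.add (d.getD p.1 PySem.Set.empty) p.2)

def stepCH (st : PVState) (p : String × String) : PVState := (stepC st.1 p, stepH st.2 p)

def foldC (qs : List (String × String)) : PySem.Dict String Int :=
  qs.foldl stepC PySem.Dict.empty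

def foldH (qs : List (String × String)) : PySem.Dict String (PySem.Set String) :=
  qs.foldl stepH PySem.Dict.empty

theorem foldCH_eq (qs : List (String × String)) :
    qs.foldl stepCH ((PySem.Dict.empty, PySem.Dict.empty) : PVState) = (foldC qs, foldH qs) := by
  have h : stepCH = fun (st : PVState) p => (stepC st.1 p, stepH st.2 p) := rfl
  rw [h, PySem.List.foldl_prod_mk, ← foldC, ← foldH]

theorem foldA_filterMap (report : List String) (st : PVState) :
    report.foldl (fun st r => match parse2 r with | some p => stepA st p | none => st) st
      = (report.filterMap parse2).foldl stepA st := by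
  induction report generalizing st with
  | nil => rfl
  | cons r rs ih =>
    cases h : parse2 r <;> simp [h, ih]

theorem mem_foldH (qs : List (String × String)) (a b : String) :
    (∃ s, (foldH qs).get? a = some s ∧ b ∈ s) ↔ (a, b) ∈ qs := by
  induction qs using List.reverseRecOn with
  | nil => simp [foldH, PySem.Dict.get?_empty]
  | append_singleton qs q ih =>
    obtain ⟨c, e⟩ := q
    rw [foldH, List.foldl_append, List.foldl_cons, List.foldl_nil, ← foldH]
    simp only [stepH]
    by_cases hac : a = c
    · subst hac
      rw [PySem.Dict.get?_insert_self, PySem.Dict.getD_eq_get?_getD]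
      constructor
      · rintro ⟨s, hs, hb⟩
        rw [Option.some.injEq] at hs
        subst hs
        rcases (PySem.Set.mem_add _ _ _).1 hb with hb' | hb'
        · cases h : (foldH qs).get? a with
          | none => rw [h] at hb'; simp [PySem.Set.empty] at hb'
          | some s0 =>
            rw [h] at hb'
            exact List.mem_append_left _ (ih.1 ⟨s0, h, by simpa using hb'⟩)
        · subst hb'
          exact List.mem_append_right _ (by simp)
      · intro hmem
        refine ⟨_, rfl, ?_⟩
        rcases List.mem_append.1 hmem with h | h
        · obtain ⟨s0, hs0, hb0⟩ := ih.2 h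
          rw [hs0]
          exact (PySem.Set.mem_add _ _ _).2 (Or.inl (by simpa using hb0))
        · have hb : b = e := by simpa using h
          subst hb
          exact (PySem.Set.mem_add _ _ _).2 (Or.inr rfl)
    · rw [PySem.Dict.get?_insert_of_ne _ _ hac, ih]
      simp [hac]

-- every value stored by A's history loop is a PySem.Set, hence Nodup
theorem nodup_values_foldH (qs : List (String × String)) (a : String) (s : PySem.Set String)
    (h : (foldH qs).get? a = some s) : s.Nodup := by
  induction qs using List.reverseRecOn generalizing s with
  | nil => simp [foldH, PySem.Dict.get?_empty] at h
  | append_singleton qs q ih =>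
    obtain ⟨c, e⟩ := q
    rw [foldH, List.foldl_append, List.foldl_cons, List.foldl_nil, ← foldH] at h
    simp only [stepH] at h
    by_cases hac : a = c
    · subst hac
      rw [PySem.Dict.get?_insert_self, Option.some.injEq] at h
      subst h
      apply PySem.Set.nodup_add
      rw [PySem.Dict.getD_eq_get?_getD]
      cases hg : (foldH qs).get? a with
      | none => simp [PySem.Set.empty]
      | some s0 => simpa using ih s0 hg
    · rw [PySem.Dict.get?_insert_of_ne _ _ hac] at h
      exact ih s h

theorem nodup_keys_foldH (qs : List (String × String)) : (foldH qs).keys.Nodup := by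
  exact PySem.Dict.nodup_keys_foldl_insert_key qs (fun p => p.1)
    (fun d p => PySem.Set.add (d.getD p.1 PySem.Set.empty) p.2) PySem.Dict.empty
    PySem.Dict.nodup_keys_empty

theorem contains_foldC (qs : List (String × String)) (b : String) :
    (foldC qs).contains b = true ↔ ∃ a, (a, b) ∈ qs := by
  rw [PySem.Dict.contains_iff_mem_keys]
  have hk : (foldC qs).keys = PySem.Set.update PySem.Dict.empty.keys (qs.map (fun p => p.2)) :=
    PySem.Dict.keys_foldl_insert_key qs (fun p => p.2) (fun d p => d.getD p.2 0 + 1)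
      PySem.Dict.empty
  rw [hk]
  rw [PySem.Set.mem_update]
  simp only [PySem.Dict.keys_empty, List.not_mem_nil, false_or, List.mem_map]
  constructor
  · rintro ⟨⟨a, c⟩, h, rfl⟩; exact ⟨a, h⟩
  · rintro ⟨a, h⟩; exact ⟨(a, b), h, rfl⟩

-- A's count dict holds exactly B's brute-force count of e as a reportee
theorem getD_foldC (qs : List (String × String)) (e : String) :
    (foldC qs).getD e 0 = ((qs.countP (fun q => q.2 == e) : Nat) : Int) := by
  have h1 : foldC qs
      = (qs.map (fun p => p.2)).foldl (fun d x => d.insert x (d.getD x 0 + 1))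
          PySem.Dict.empty := by
    rw [List.foldl_map]; rfl
  rw [h1, PySem.Dict.getD_foldl_insert_add_one, PySem.Dict.getD_empty, zero_add,
      List.count_eq_countP, List.countP_map]
  rfl

-- overwriting a key with the value it already has is a no-op
theorem insert_self_of_get? {ν : Type} (d : PySem.Dict String ν) (k : String) (v : ν)
    (hnd : d.keys.Nodup) (h : d.get? k = some v) : d.insert k v = d := by
  apply PySem.Dict.ext
  rw [PySem.Dict.items_insert_of_contains _ _
      (by rw [PySem.Dict.contains_eq_isSome_get?, h]; rfl)]
  calc d.items.map (fun p => if p.1 == k then (k, v) else p)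
      = d.items.map id := by
        apply List.map_congr_left
        intro p hp
        by_cases hpk : p.1 = k
        · have hmem : (p.1, p.2) ∈ d.items := by simpa using hp
          rw [hpk] at hmem
          have hv := PySem.Dict.get?_of_mem_items _ hmem hnd
          rw [h] at hv
          rw [Option.some.injEq] at hv
          simp [Prod.ext_iff, hpk, hv]
        · simp [hpk]
    _ = d.items := List.map_id _

theorem modify_eq_insert (d : PySem.Dict String Int) (k : String) :
    d.modify k 0 (· + 1) = d.insert k (d.getD k 0 + 1) := rfl

-- the crux: A's loop over the raw pair list reaches exactly the state of the
-- simple count/history folds over the DEDUPLICATED list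
theorem stateA_eq (ps : List (String × String)) :
    ps.foldl stepA ((PySem.Dict.empty, PySem.Dict.empty) : PVState)
      = (PySem.Set.ofList ps).foldl stepCH ((PySem.Dict.empty, PySem.Dict.empty) : PVState) := by
  induction ps using List.reverseRecOn with
  | nil => rfl
  | append_singleton ps p ih =>
    obtain ⟨a, b⟩ := p
    rw [List.foldl_append, List.foldl_cons, List.foldl_nil, ih,
        PySem.Set.ofList_append_singleton, PySem.Set.add_eq_ite]
    by_cases hp : (a, b) ∈ (PySem.Set.ofList ps : List (String × String))
    · -- duplicate pair: A's loop body changes nothing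
      rw [if_pos hp, foldCH_eq]
      obtain ⟨s, hs, hb⟩ := (mem_foldH (PySem.Set.ofList ps) a b).2 hp
      have hc : (foldC (PySem.Set.ofList ps)).contains b = true :=
        (contains_foldC _ b).2 ⟨a, hp⟩
      have hch : (foldH (PySem.Set.ofList ps)).contains a = true := by
        rw [PySem.Dict.contains_eq_isSome_get?, hs]; rfl
      have hcs : PySem.Set.contains s b = true := (PySem.Set.contains_iff s b).2 hb
      simp only [stepA, hc, hch, hs, hcs, Bool.true_eq_false, if_false, if_true]
      rw [PySem.Dict.getD_eq_get?_getD, hs]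
      simp only [Option.getD_some]
      rw [PySem.Set.add_of_mem hb, insert_self_of_get? _ a s (nodup_keys_foldH _) hs]
    · -- fresh pair: A's loop body does exactly what the simple folds do
      rw [if_neg hp, List.foldl_append, List.foldl_cons, List.foldl_nil, foldCH_eq]
      simp only [stepA, stepCH, stepC, stepH]
      rw [Prod.mk.injEq]
      constructor
      · -- count component
        by_cases hcb : (foldC (PySem.Set.ofList ps)).contains b = true
        · cases hga : (foldH (PySem.Set.ofList ps)).get? a with
          | none => simp [hcb, modify_eq_insert]
          | some s =>
            have hbs : b ∉ s := fun hbs => hp ((mem_foldH _ a b).1 ⟨s, hga, hbs⟩)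
            simp [hcb, hbs, modify_eq_insert]
        · have hcb' : (foldC (PySem.Set.ofList ps)).contains b = false := by
            simpa using hcb
          rw [PySem.Dict.getD_of_not_contains _ _ hcb']
          simp [hcb']
      · -- history component
        by_cases hha : (foldH (PySem.Set.ofList ps)).contains a = true
        · simp [hha]
        · have hha' : (foldH (PySem.Set.ofList ps)).contains a = false := by
            simpa using hha
          rw [PySem.Dict.getD_of_not_contains _ _ hha']
          have : PySem.Set.add PySem.Set.empty b = [b] :=
            PySem.Set.add_of_not_mem (by simp [PySem.Set.empty])
          rw [this]
          have hnd : ([b] : List String).Nodup := by simp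
          rw [show (PySem.Set.ofList [b] : List String) = [b] from
            PySem.Set.ofList_eq_self_of_nodup _ hnd]
          simp [hha']

-- membership in A's reported_result dict
theorem contains_RR (C : PySem.Dict String Int) (k : Int) (l : List String) (x : String) :
    ((l.foldl (fun (d : PySem.Dict String Bool) r =>
        if k ≤ C.getD r 0 then d.insert r true else d) PySem.Dict.empty).contains x = true)
      ↔ (x ∈ l ∧ k ≤ C.getD x 0) := by
  rw [PySem.List.foldl_ite_eq_foldl_filter]
  rw [PySem.Dict.contains_iff_mem_keys]
  have hk := PySem.Dict.keys_foldl_insert_key (ν := Bool)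
      (l.filter (fun r => decide (k ≤ C.getD r 0))) (fun r => r) (fun _ _ => true)
      PySem.Dict.empty
  rw [hk]
  rw [PySem.Set.mem_update]
  simp [List.mem_filter, PySem.Dict.keys_empty]

-- membership in B's banned set, phrased over the deduplicated pair list
theorem contains_banned (qs : List (String × String)) (k : Int) (x : String) :
    (PySem.Set.contains (PySem.Set.ofList ((qs.filter
        (fun p => decide (k ≤ ((qs.countP (fun q => q.2 == p.2) : Nat) : Int)))).map (·.2))) x
       = true)
      ↔ ((∃ a, (a, x) ∈ qs) ∧ k ≤ ((qs.countP (fun q => q.2 == x) : Nat) : Int)) := by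
  rw [PySem.Set.contains_iff, PySem.Set.mem_ofList]
  constructor
  · intro h
    obtain ⟨p, hp, rfl⟩ := List.mem_map.1 h
    have hp' := List.mem_filter.1 hp
    exact ⟨⟨p.1, by simpa using hp'.1⟩, by simpa using hp'.2⟩
  · rintro ⟨⟨a, ha⟩, hk⟩
    exact List.mem_map.2 ⟨(a, x),
      List.mem_filter.2 ⟨ha, by simpa using hk⟩, rfl⟩

-- the reportees a user u reported, read off the deduplicated pair list, have no duplicates
theorem nodup_seconds (qs : List (String × String)) (hnd : qs.Nodup) (u : String) :
    ((qs.filter (fun p => p.1 == u)).map (·.2)).Nodup := by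
  apply List.Nodup.map_on _ (hnd.filter _)
  intro p hp q hq h2
  have hp1 : p.1 = u := by simpa using (List.mem_filter.1 hp).2
  have hq1 : q.1 = u := by simpa using (List.mem_filter.1 hq).2
  exact Prod.ext (hp1.trans hq1.symm) h2

-- per-user agreement: A's inner counting loop over report_history[u] equals B's scan of the pairs
theorem user_count_eq (qs : List (String × String)) (hnd : qs.Nodup) (u : String)
    (pred : String → Bool) (s : PySem.Set String) (hs : (foldH qs).get? u = some s) :
    s.countP pred = qs.countP (fun p => p.1 == u && pred p.2) := by
  have hmem : ∀ b, b ∈ s ↔ (u, b) ∈ qs := by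
    intro b
    constructor
    · intro hb; exact (mem_foldH qs u b).1 ⟨s, hs, hb⟩
    · intro hb
      obtain ⟨s', hs', hb'⟩ := (mem_foldH qs u b).2 hb
      rw [hs] at hs'
      rw [Option.some.injEq] at hs'
      exact hs' ▸ hb'
  have hperm : s.Perm ((qs.filter (fun p => p.1 == u)).map (·.2)) := by
    rw [List.perm_ext_iff_of_nodup (nodup_values_foldH qs u s hs) (nodup_seconds qs hnd u)]
    intro b
    rw [hmem b, List.mem_map]
    constructor
    · intro hb
      exact ⟨(u, b), List.mem_filter.2 ⟨hb, by simp⟩, rfl⟩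
    · rintro ⟨p, hp, rfl⟩
      have hp' := List.mem_filter.1 hp
      have h1 : p.1 = u := by simpa using hp'.2
      have : p = (u, p.2) := Prod.ext h1 rfl
      exact this ▸ hp'.1
  rw [hperm.countP_eq, List.countP_map, List.countP_filter]
  apply List.countP_congr
  intro p _
  simp [Bool.and_comm]

-- if u never reported, B's scan finds nothing
theorem user_count_zero (qs : List (String × String)) (u : String) (pred : String → Bool)
    (hs : (foldH qs).get? u = none) :
    qs.countP (fun p => p.1 == u && pred p.2) = 0 := by
  rw [List.countP_eq_zero]
  intro p hp
  suffices h : p.1 ≠ u by simp [h]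
  intro h1
  obtain ⟨s, hs', _⟩ := (mem_foldH qs u p.2).2 (by rw [← h1]; exact hp)
  rw [hs] at hs'
  simp at hs'

-- A's answer loop equals B's answer comprehension, over the deduplicated pairs qs
theorem answers_eq (qs : List (String × String)) (hnd : qs.Nodup) (k : Int)
    (ids : List String) :
    ids.foldl (fun answer userId =>
        match (foldH qs).get? userId with
        | none => answer ++ [(0 : Int)]
        | some s => answer ++ [s.foldl (fun cnt reportee =>
            if ((foldC qs).keys.foldl (fun (d : PySem.Dict String Bool) reportee =>
                 if k ≤ (foldC qs).getD reportee 0 then d.insert reportee true else d)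
                 PySem.Dict.empty).contains reportee then cnt + 1 else cnt) (0 : Int)]) []
      = ids.map (fun u =>
          ((qs.countP (fun p => p.1 == u && PySem.Set.contains (PySem.Set.ofList ((qs.filter
              (fun p => decide (k ≤ ((qs.countP (fun q => q.2 == p.2) : Nat) : Int)))).map (·.2)))
              p.2) : Nat) : Int)) := by
  have hfun : (fun x => PySem.Dict.contains
        ((foldC qs).keys.foldl (fun (d : PySem.Dict String Bool) r =>
          if k ≤ (foldC qs).getD r 0 then d.insert r true else d) PySem.Dict.empty) x)
      = (fun x => PySem.Set.contains (PySem.Set.ofList ((qs.filter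
          (fun p => decide (k ≤ ((qs.countP (fun q => q.2 == p.2) : Nat) : Int)))).map (·.2))) x) := by
    funext x
    rw [Bool.eq_iff_iff, contains_RR, contains_banned]
    rw [← PySem.Dict.contains_iff_mem_keys, contains_foldC, getD_foldC]
  induction ids using List.reverseRecOn with
  | nil => rfl
  | append_singleton ids u ih =>
    rw [List.foldl_append, List.foldl_cons, List.foldl_nil, ih, List.map_append,
        List.map_singleton]
    cases hgu : (foldH qs).get? u with
    | none =>
      simp only [List.append_cancel_left_eq, List.cons.injEq, and_true]
      rw [user_count_zero qs u _ hgu]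
      rfl
    | some s =>
      simp only [List.append_cancel_left_eq, List.cons.injEq, and_true]
      rw [PySem.List.foldl_count_if, zero_add]
      have hc := congrArg (fun p => ((List.countP p s : Nat) : Int)) hfun
      simp only at hc
      rw [hc, user_count_eq qs hnd u _ s hgu]

-- ===== VERDICT (by name: the statement is the Claim_ definition above) =====
theorem solution_spec : Claim_equal_solution := by
  intro id_list report k _ _
  unfold Spec_solution
  show solution id_list report k = solution_alt id_list report k
  simp only [solution, solution_alt]
  rw [foldA_filterMap, stateA_eq, foldCH_eq]
  exact answers_eq (PySem.Set.ofList (report.filterMap parse2))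
    (PySem.Set.nodup_ofList _) k id_list
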